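-- pv_equiv track=rewrite | github.com/zapman449/kops-cleaner | kops-r53-clean.py | derive_potential_zones
-- ===== SOURCE A (Python) =====
-- def derive_potential_zones(name):
--     potential_zones = []
--     words = name.split('.')
--     idx = 0
--     while idx < len(words) - 1:
--         # -2 allows to ignore the empty string, and the .com TLD
--         # using -1 on the off chance someone is running their own TLD
--         idx += 1
--         potential_zones.append('.'.join(words[idx:]) + '.')
--     return potential_zones
-- ===== SOURCE B (Python) =====
-- def derive_potential_zones(name):
--     # Build zones back-to-front: zone(i) = words[i] + '.' + zone(i+1),
--     # base zone(last) = words[last] + '.'; then reverse to longest-first order.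
--     words = name.split('.')
--     if len(words) < 2:
--         return []
--     acc = words[-1] + '.'
--     out = [acc]
--     for i in range(len(words) - 2, 0, -1):
--         acc = words[i] + '.' + acc
--         out.append(acc)
--     out.reverse()
--     return out
-- ===== Notes on version B (the rewrite author's own statement) =====
-- stated objective: alternative
-- what changed: Replaces the per-suffix slice-and-join of A with a single backward pass that extends one running accumulator string via the recurrence zone(i) = label(i) + dot + zone(i+1), appending each zone and reversing at the end.
import Mathlib
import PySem

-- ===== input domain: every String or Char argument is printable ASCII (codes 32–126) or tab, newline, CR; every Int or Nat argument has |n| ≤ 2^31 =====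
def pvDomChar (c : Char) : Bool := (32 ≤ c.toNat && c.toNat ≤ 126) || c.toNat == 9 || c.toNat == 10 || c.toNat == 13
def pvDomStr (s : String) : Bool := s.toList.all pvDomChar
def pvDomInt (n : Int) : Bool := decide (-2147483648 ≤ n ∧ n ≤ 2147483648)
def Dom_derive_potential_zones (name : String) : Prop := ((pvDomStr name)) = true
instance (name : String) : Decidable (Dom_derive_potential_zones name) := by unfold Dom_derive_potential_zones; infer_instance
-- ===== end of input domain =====

-- B replaces A's per-suffix slice-and-join by one backward pass extending a running
-- accumulator (zone(i) = label(i) + dot + zone(i+1)) and a final reverse (alternative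
-- decomposition; return value only, no mutation involved).

-- ===== PORT A =====
-- while loop: idx += 1; append '.'.join(words[idx:]) + '.'
def pvALoop (ws : List (List Char)) (idx : Nat) (acc : List String) : List String :=
  if idx < ws.length - 1 then
    pvALoop ws (idx + 1)
      (acc ++ [String.ofList (PySem.Chars.join ['.'] (PySem.List.slice ws (some ((idx : Int) + 1)) none) ++ ['.'])])
  else acc
termination_by ws.length - idx

def derive_potential_zones (name : String) : List String :=
  pvALoop (PySem.Chars.splitOn name.toList ['.']) 0 []

-- ===== PORT B =====
-- backward loop over range(len(words)-2, 0, -1) with accumulator, then reverse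
def derive_potential_zones_alt (name : String) : List String :=
  let ws := PySem.Chars.splitOn name.toList ['.']
  if ws.length < 2 then []
  else
    let acc0 := PySem.List.pyGetD ws (-1) [] ++ ['.']   -- words[-1] (ws nonempty here, so total)
    let st := (PySem.List.pyRange ((ws.length : Int) - 2) 0 (-1)).foldl
      (fun (st : List Char × List String) i =>
        let acc := PySem.List.pyGetD ws i [] ++ ['.'] ++ st.1
        (acc, st.2 ++ [String.ofList acc]))
      (acc0, [String.ofList acc0])
    st.2.reverse

-- ===== PRECONDITION & SPEC =====
def Spec_derive_potential_zones (name : String) (out : List String) : Prop := out = derive_potential_zones_alt name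
instance (name : String) (out : List String) : Decidable (Spec_derive_potential_zones name out) := by unfold Spec_derive_potential_zones; infer_instance

-- ===== CLAIM (what is proved, stated in full; the proofs are below) =====
def Claim_equal_derive_potential_zones : Prop := ∀ (name : String), Dom_derive_potential_zones name → Spec_derive_potential_zones name (derive_potential_zones name)

-- ===== LEMMAS AND PROOFS =====

-- the zone at index i, as a list of chars
def pvZone (ws : List (List Char)) (i : Nat) : List Char :=
  PySem.Chars.join ['.'] (ws.drop i) ++ ['.']

lemma pvZone_step (ws : List (List Char)) (i : Nat) (h : i + 1 < ws.length) :
    pvZone ws i = ws[i] ++ ['.'] ++ pvZone ws (i + 1) := by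
  have h0 : i < ws.length := by omega
  have hd : ws.drop i = ws[i] :: ws.drop (i + 1) := List.drop_eq_getElem_cons h0
  have hd1 : ws.drop (i + 1) ≠ [] := by
    simp [List.drop_eq_nil_iff]; omega
  obtain ⟨q, rest, hq⟩ : ∃ q rest, ws.drop (i + 1) = q :: rest := by
    cases hws : ws.drop (i + 1) with
    | nil => exact absurd hws hd1
    | cons q rest => exact ⟨q, rest, rfl⟩
  simp [pvZone, hd, hq, PySem.Chars.join_cons_cons]

lemma pvALoop_spec (ws : List (List Char)) (idx : Nat) (acc : List String) :
    pvALoop ws idx acc =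
      acc ++ (List.range' (idx + 1) (ws.length - 1 - idx)).map (fun i => String.ofList (pvZone ws i)) := by
  by_cases h : idx < ws.length - 1
  · rw [pvALoop]
    simp only [h, if_true]
    rw [pvALoop_spec ws (idx + 1)]
    have hn : ws.length - 1 - idx = (ws.length - 1 - (idx + 1)) + 1 := by omega
    have hr : List.range' (idx + 1) (ws.length - 1 - idx)
        = (idx + 1) :: List.range' (idx + 2) (ws.length - 1 - (idx + 1)) := by
      rw [hn, List.range'_succ]
    have hs : PySem.List.slice ws (some ((idx : Int) + 1)) none = ws.drop (idx + 1) := by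
      have : ((idx : Int) + 1) = ((idx + 1 : Nat) : Int) := by push_cast; ring
      rw [this, PySem.List.slice_from_natCast]
    rw [hr]
    simp [hs, pvZone]
  · rw [pvALoop]
    simp only [h, if_false]
    have : ws.length - 1 - idx = 0 := by omega
    simp [this]
termination_by ws.length - idx

-- B's fold invariant: consuming range(m, 0, -1) from state (zone(m+1), out)
lemma pvBLoop_spec (ws : List (List Char)) (m : Nat) (hm : m + 2 ≤ ws.length) (out : List String) :
    (PySem.List.pyRange (m : Int) 0 (-1)).foldl
      (fun (st : List Char × List String) i =>
        let acc := PySem.List.pyGetD ws i [] ++ ['.'] ++ st.1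
        (acc, st.2 ++ [String.ofList acc]))
      (pvZone ws (m + 1), out)
    = (pvZone ws 1,
       out ++ ((List.range' 1 m).map (fun i => String.ofList (pvZone ws i))).reverse) := by
  induction m generalizing out with
  | zero =>
    rw [PySem.List.pyRange_neg_one_eq_nil (by norm_num)]
    simp
  | succ k ih =>
    rw [PySem.List.pyRange_neg_one_cons (by positivity)]
    rw [show ((k + 1 : Nat) : Int) - 1 = (k : Int) by omega]
    simp only [List.foldl_cons]
    have hget : PySem.List.pyGetD ws ((k + 1 : Nat) : Int) [] = ws[k + 1]'(by omega) := by
      rw [PySem.List.pyGetD_eq_getElem ws [] (by omega) (by exact_mod_cast (by omega : k + 1 < ws.length))]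
      simp
    have hz : ws[k + 1]'(by omega) ++ ['.'] ++ pvZone ws (k + 2) = pvZone ws (k + 1) :=
      (pvZone_step ws (k + 1) (by omega)).symm
    simp only [hget]
    rw [show k + 1 + 1 = k + 2 from rfl] at hz
    rw [hz, ih (by omega)]
    have : List.range' 1 (k + 1) = List.range' 1 k ++ [k + 1] := by
      simpa [Nat.add_comm] using List.range'_concat (s := 1) (n := k) (step := 1)
    simp [this]

lemma pvZone_last (ws : List (List Char)) (h : 2 ≤ ws.length) :
    PySem.List.pyGetD ws (-1) [] ++ ['.'] = pvZone ws (ws.length - 1) := by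
  have hlen : ws.length - 1 < ws.length := by omega
  have hd : ws.drop (ws.length - 1) = [ws[ws.length - 1]] := by
    rw [List.drop_eq_getElem_cons hlen, show ws.length - 1 + 1 = ws.length by omega,
      List.drop_length]
  have hget : PySem.List.pyGetD ws (-1) [] = ws[ws.length - 1] := by
    have hne : ws ≠ [] := by intro hnil; rw [hnil] at h; simp at h
    rw [PySem.List.pyGetD_neg_one ws [] hne]
    exact List.getLast_eq_getElem hne
  rw [hget]
  simp [pvZone, hd, PySem.Chars.join_singleton]

-- ===== VERDICT (by name: the statement is the Claim_ definition above) =====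
theorem derive_potential_zones_spec : Claim_equal_derive_potential_zones := by
  intro name _
  unfold Spec_derive_potential_zones derive_potential_zones derive_potential_zones_alt
  set ws := PySem.Chars.splitOn name.toList ['.'] with hws
  by_cases h2 : ws.length < 2
  · simp only [h2, if_true]
    rw [pvALoop_spec]
    have : ws.length - 1 - 0 = 0 := by omega
    simp [this]
  · simp only [h2, if_false]
    replace h2 : 2 ≤ ws.length := by omega
    rw [pvALoop_spec]
    have hlast : PySem.List.pyGetD ws (-1) [] ++ ['.'] = pvZone ws (ws.length - 1) :=
      pvZone_last ws h2
    simp only [hlast]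
    have hmle : (ws.length - 2) + 2 ≤ ws.length := by omega
    have hm1 : (ws.length - 2) + 1 = ws.length - 1 := by omega
    rw [show ((ws.length : Int) - 2) = (((ws.length - 2 : Nat)) : Int) by omega]
    rw [show pvZone ws (ws.length - 1) = pvZone ws ((ws.length - 2) + 1) by rw [hm1]]
    rw [pvBLoop_spec ws (ws.length - 2) hmle]
    simp only [List.reverse_append, List.reverse_reverse, List.reverse_singleton]
    have hr : List.range' 1 (ws.length - 1 - 0)
        = List.range' 1 (ws.length - 2) ++ [ws.length - 1] := by
      rw [show ws.length - 1 - 0 = (ws.length - 2) + 1 by omega]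
      have := List.range'_concat (s := 1) (n := ws.length - 2) (step := 1)
      simp at this
      rw [this]
      congr 2
      omega
    rw [hr]
    simp [hm1]
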